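-- pv_equiv track=rewrite | github.com/BlueScreenMaker/minjung_Algorithm | 프로그래머스/LV1/과일장수.py | solution
-- ===== SOURCE A (Python) =====
-- def solution(k,m,score) :
--     answer = 0
--     score = sorted(score)
--     boxes = []
--     for i in range(len(score)//m) :
--         box = []
--         for j in range(m) :
--             box.append(score[-1])
--             del score[-1]
--         boxes.append(m*min(box))
--     answer = sum(boxes)
--     return answer
-- ===== SOURCE B (Python) =====
-- def solution(k, m, score):
--     s = sorted(score, reverse=True)
--     answer = 0
--     for i in range(len(score) // m):
--         answer += m * s[i*m + m - 1]
--     return answer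
-- ===== Notes on version B (the rewrite author's own statement) =====
-- stated objective: simpler
-- what changed: Instead of repeatedly popping m elements off a mutated ascending-sorted list, building each box and taking its min, B sorts once in descending order and directly indexes the minimum of each group at position i*m+m-1, accumulating the sum in one flat loop.
import Mathlib
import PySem

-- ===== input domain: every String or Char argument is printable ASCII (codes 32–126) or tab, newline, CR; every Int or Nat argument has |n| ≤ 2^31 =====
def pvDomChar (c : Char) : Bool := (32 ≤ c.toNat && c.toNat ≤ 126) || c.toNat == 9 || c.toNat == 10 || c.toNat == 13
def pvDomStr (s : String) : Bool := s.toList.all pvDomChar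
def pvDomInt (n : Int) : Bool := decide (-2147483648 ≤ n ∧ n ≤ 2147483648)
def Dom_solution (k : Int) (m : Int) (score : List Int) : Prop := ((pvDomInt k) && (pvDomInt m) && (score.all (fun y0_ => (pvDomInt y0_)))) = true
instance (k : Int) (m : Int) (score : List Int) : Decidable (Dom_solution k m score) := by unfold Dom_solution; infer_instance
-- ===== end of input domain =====

-- B replaces A's pop-m-elements-per-box mutation of the ascending sort with one descending
-- sort and direct indexing of each box's minimum at i*m+m-1 (objective: simpler).

-- ===== PORT A =====
-- inner loop body: box.append(score[-1]); del score[-1]   (state = (box, score))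
def solInner (st : List Int × List Int) (_ : Int) : List Int × List Int :=
  (st.1 ++ [PySem.List.pyGetD st.2 (-1) 0], st.2.dropLast)

-- outer loop body: run the inner loop, then boxes.append(m*min(box))  (state = (boxes, score))
def solOuter (m : Int) (st : List Int × List Int) (_ : Int) : List Int × List Int :=
  let inner := (PySem.List.pyRange 0 m 1).foldl solInner ([], st.2)
  (st.1 ++ [m * (PySem.List.min? inner.1 (fun x => x)).getD 0], inner.2)

def solution (k : Int) (m : Int) (score : List Int) : Int :=
  let s := PySem.List.sorted score (fun x => x) false
  let st := (PySem.List.pyRange 0 (PySem.Int.floordiv (PySem.List.len s) m) 1).foldl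
      (solOuter m) ([], s)
  st.1.sum

-- ===== PORT B =====
def solution_alt (k : Int) (m : Int) (score : List Int) : Int :=
  let s := PySem.List.sorted score (fun x => x) true
  (PySem.List.pyRange 0 (PySem.Int.floordiv (PySem.List.len score) m) 1).foldl
    (fun ans i => ans + m * PySem.List.pyGetD s (i * m + m - 1) 0) 0

-- ===== PRECONDITION & SPEC =====
-- A raises ZeroDivisionError at len(score)//m when m = 0; excluded (B raises there too).
def Pre_solution (k : Int) (m : Int) (score : List Int) : Prop := m ≠ 0
instance (k : Int) (m : Int) (score : List Int) : Decidable (Pre_solution k m score) := by unfold Pre_solution; infer_instance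
def pvWitness_solution : Int × Int × List Int := (4, 2, [1, 2, 3, 1, 2])

def Spec_solution (k : Int) (m : Int) (score : List Int) (out : Int) : Prop := out = solution_alt k m score
instance (k : Int) (m : Int) (score : List Int) (out : Int) : Decidable (Spec_solution k m score out) := by unfold Spec_solution; infer_instance

-- ===== CLAIM (what is proved, stated in full; the proofs are below) =====
def Claim_equal_solution : Prop := ∀ (k : Int) (m : Int) (score : List Int), Dom_solution k m score → Pre_solution k m score → Spec_solution k m score (solution k m score)

-- ===== LEMMAS AND PROOFS =====

-- A's inner loop pops the last M elements: it moves the reversed suffix into the box.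
lemma inner_char (M : Nat) (L box₀ : List Int) (hM : M ≤ L.length) :
    (PySem.List.pyRange 0 (M : Int) 1).foldl solInner (box₀, L)
      = (box₀ ++ (L.drop (L.length - M)).reverse, L.take (L.length - M)) := by
  induction M with
  | zero => simp [PySem.List.pyRange_one_eq_nil]
  | succ M ih =>
    have hc : ((M + 1 : Nat) : Int) = (M : Int) + 1 := by push_cast; ring
    rw [hc, PySem.List.pyRange_one_succ_right (by positivity), List.foldl_append,
      ih (by omega)]
    have hne : L.take (L.length - M) ≠ [] := by
      apply List.ne_nil_of_length_pos
      rw [List.length_take]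
      omega
    simp only [List.foldl_cons, List.foldl_nil, solInner]
    have h1 : L.length - (M + 1) < L.length := by omega
    have h2 : L.length - (M + 1) + 1 = L.length - M := by omega
    have hdrop : L.drop (L.length - (M + 1)) = L[L.length - (M + 1)] :: L.drop (L.length - M) := by
      rw [List.drop_eq_getElem_cons h1, h2]
    simp only [Prod.mk.injEq]
    constructor
    · -- box component
      have hix : (L.take (L.length - M)).length - 1 = L.length - (M + 1) := by
        rw [List.length_take]; omega
      rw [PySem.List.pyGetD_neg_one _ 0 hne, List.getLast_eq_getElem, hdrop]
      simp only [List.getElem_take, hix, List.reverse_cons, List.append_assoc]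
    · -- score component
      rw [List.dropLast_eq_take, List.take_take]
      congr 1
      rw [List.length_take]
      omega

-- the minimum of the reversed suffix of an ascending list is the suffix's first element
lemma min_drop_rev (L : List Int) (hp : L.Pairwise (· ≤ ·)) (j : Nat) (hj : j < L.length) :
    (PySem.List.min? ((L.drop j).reverse) (fun x => x)).getD 0 = L[j] := by
  have hd : L.drop j = L[j] :: L.drop (j + 1) := List.drop_eq_getElem_cons hj
  cases hmin : PySem.List.min? ((L.drop j).reverse) (fun x => x) with
  | none =>
    rw [PySem.List.min?_eq_none_iff] at hmin
    exact absurd (List.drop_eq_nil_iff.mp (List.reverse_eq_nil_iff.mp hmin)) (by omega)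
  | some v =>
    have hv1 : v ∈ (L.drop j).reverse := PySem.List.min?_mem hmin
    have hv2 := PySem.List.min?_isMin hmin
    have hle : v ≤ L[j] := hv2 _ (by rw [List.mem_reverse, hd]; exact List.mem_cons_self)
    have hp' : (L.drop j).Pairwise (· ≤ ·) := hp.drop
    rw [hd] at hp'
    have hv1' : v ∈ L[j] :: L.drop (j + 1) := by rw [← hd]; exact List.mem_reverse.mp hv1
    have hge : L[j] ≤ v := by
      rcases List.mem_cons.mp hv1' with h | h
      · exact le_of_eq h.symm
      · exact (List.pairwise_cons.mp hp').1 v h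
    simp
    omega

-- A's outer loop: after t rounds the boxes hold m * (minimum of each group) and the
-- remaining score list is the untouched ascending prefix.
lemma outer_char (M : Nat) (hM : 0 < M) (L : List Int) (hp : L.Pairwise (· ≤ ·))
    (t : Nat) (bs : List Int) (ht : t * M ≤ L.length) :
    (PySem.List.pyRange 0 (t : Int) 1).foldl (solOuter (M : Int)) (bs, L)
      = (bs ++ (List.range t).map (fun i => (M : Int) * L.getD (L.length - (i + 1) * M) 0),
         L.take (L.length - t * M)) := by
  induction t generalizing bs with
  | zero => simp [PySem.List.pyRange_one_eq_nil]
  | succ t ih =>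
    have hc : ((t + 1 : Nat) : Int) = (t : Int) + 1 := by push_cast; ring
    have htM : t * M ≤ L.length := by
      have : t * M ≤ (t + 1) * M := by nlinarith
      omega
    rw [hc, PySem.List.pyRange_one_succ_right (by positivity), List.foldl_append,
      ih bs htM]
    simp only [List.foldl_cons, List.foldl_nil, solOuter]
    have hcl : (L.take (L.length - t * M)).length = L.length - t * M := by
      rw [List.length_take]
      omega
    have hMle : M ≤ (L.take (L.length - t * M)).length := by
      rw [hcl]; have : (t + 1) * M = t * M + M := by ring
      omega
    rw [inner_char M _ [] hMle]
    simp only [List.nil_append]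
    have hjlt : (L.take (L.length - t * M)).length - M < (L.take (L.length - t * M)).length := by
      omega
    rw [min_drop_rev _ (hp.take) _ hjlt]
    have hidx : L.length - (t + 1) * M < L.length := by
      have : (t + 1) * M = t * M + M := by ring
      omega
    simp only [Prod.mk.injEq]
    constructor
    · -- boxes component
      have hix : (L.take (L.length - t * M)).length - M = L.length - (t + 1) * M := by
        rw [hcl]
        have : (t + 1) * M = t * M + M := by ring
        omega
      rw [List.range_succ, List.map_append, ← List.append_assoc]
      simp only [List.map_cons, List.map_nil, List.getElem_take, hix,
        List.getD_eq_getElem L 0 hidx]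
    · -- score component
      rw [List.take_take, hcl]
      congr 1
      have : (t + 1) * M = t * M + M := by ring
      omega

-- sorted(xs, reverse=True) is reversed(sorted(xs)) for identity keys (Int values)
lemma desc_eq_rev_asc (score : List Int) :
    PySem.List.sorted score (fun x => x) true
      = (PySem.List.sorted score (fun x => x) false).reverse := by
  apply List.Perm.eq_of_pairwise (le := fun a b : Int => b ≤ a)
  · exact fun a b _ _ h1 h2 => le_antisymm h2 h1
  · exact PySem.List.sorted_pairwise_rev score (fun x => x)
  · rw [List.pairwise_reverse]
    exact PySem.List.sorted_pairwise score (fun x => x)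
  · exact ((PySem.List.sorted_perm score (fun x => x) true).trans
      (PySem.List.sorted_perm score (fun x => x) false).symm).trans
      (List.reverse_perm _).symm

-- for a negative m both loops are over an empty range
lemma floordiv_nonpos_of_neg (n : Nat) (m : Int) (hm : m < 0) :
    PySem.Int.floordiv (n : Int) m ≤ 0 := by
  by_contra h
  have hmod := PySem.Int.mod_neg_bounds (n : Int) hm
  have heq := PySem.Int.floordiv_mul_add_mod (n : Int) m
  have h1 : 1 ≤ PySem.Int.floordiv (n : Int) m := by omega
  have : PySem.Int.floordiv (n : Int) m * m ≤ 1 * m := by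
    exact mul_le_mul_of_nonpos_right h1 (le_of_lt hm)
  have hn : (0 : Int) ≤ (n : Int) := by positivity
  nlinarith

-- ===== VERDICT (by name: the statement is the Claim_ definition above) =====
theorem solution_spec : Claim_equal_solution := by
  intro k m score _ hpre
  unfold Spec_solution solution solution_alt
  simp only [PySem.List.len_eq, PySem.List.length_sorted]
  rcases lt_trichotomy m 0 with hm | hm | hm
  · -- m < 0 : range(len//m) is empty in both
    rw [PySem.List.pyRange_one_eq_nil (floordiv_nonpos_of_neg score.length m hm)]
    simp
  · exact absurd hm hpre
  · -- m > 0
    set M : Nat := m.toNat with hMdef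
    have hmM : m = (M : Int) := by omega
    have hM : 0 < M := by omega
    set asc := PySem.List.sorted score (fun x => x) false with hasc
    have hlen : asc.length = score.length := PySem.List.length_sorted _ _ _
    have hfd : PySem.Int.floordiv (score.length : Int) m
        = ((score.length / M : Nat) : Int) := by
      rw [hmM]; exact PySem.Int.floordiv_natCast _ _
    set G : Nat := score.length / M with hGdef
    have hGM : G * M ≤ score.length := Nat.div_mul_le_self _ _
    rw [hfd, hmM]
    rw [outer_char M hM asc (PySem.List.sorted_pairwise score (fun x => x)) G []
      (by omega)]
    rw [PySem.List.foldl_add, desc_eq_rev_asc score, ← hasc]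
    rw [PySem.List.pyRange_zero_natCast, List.map_map]
    simp only [List.nil_append, zero_add]
    congr 1
    apply List.map_congr_left
    intro i hi
    have hiG : i < G := List.mem_range.mp hi
    have hle : (i + 1) * M ≤ score.length := by
      have h1 : (i + 1) * M ≤ G * M := Nat.mul_le_mul_right M hiG
      omega
    have hidx : (i : Int) * (M : Int) + (M : Int) - 1 = ((i * M + M - 1 : Nat) : Int) := by
      push_cast [Nat.cast_sub (by nlinarith : 1 ≤ i * M + M)]
      ring
    simp only [Function.comp]
    rw [hidx, PySem.List.pyGetD_natCast]
    have hlt : i * M + M - 1 < asc.reverse.length := by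
      rw [List.length_reverse, hlen]
      have : (i + 1) * M = i * M + M := by ring
      omega
    rw [List.getD_eq_getElem _ 0 hlt, List.getElem_reverse]
    have hidx2 : asc.length - 1 - (i * M + M - 1) = asc.length - (i + 1) * M := by
      rw [hlen]
      have : (i + 1) * M = i * M + M := by ring
      omega
    have hlt2 : asc.length - (i + 1) * M < asc.length := by
      rw [hlen]
      have h0 : 0 < (i + 1) * M := by positivity
      omega
    rw [List.getD_eq_getElem _ 0 hlt2]
    simp only [hidx2]
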